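-- pv_equiv track=rewrite | github.com/GopalMahato2026/basic_programs | diamond_pattern.py | longest_word_length
-- ===== SOURCE A (Python) =====
-- def longest_word_length(s):
--     """
--     Function to find the length of the longest word in a string without using built-in functions.
--
--     Parameters:
--     s (str): The input string.
--
--     Returns:
--     int: The length of the longest word.
--     """
--     if not s:  # Check if string is empty
--         return 0
--
--     max_length = 0
--     current_length = 0
--
--     for char in s:
--         if char == ' ' or char == '\t' or char == '\n':  # If we encounter a whitespace
--             # Update max_length if current word is longer
--             if current_length > max_length:
--                 max_length = current_length
--             current_length = 0  # Reset current word length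
--         else:
--             current_length += 1  # Increment current word length
--
--     # Check for the last word (which might not be followed by a space)
--     if current_length > max_length:
--         max_length = current_length
--
--     return max_length
-- ===== SOURCE B (Python) =====
-- def longest_word_length(s):
--     """Length of the longest word: normalize separators to ' ', split, take max."""
--     words = s.replace('\t', ' ').replace('\n', ' ').split(' ')
--     return max((len(w) for w in words), default=0)
-- ===== Notes on version B (the rewrite author's own statement) =====
-- stated objective: faster
-- what changed: Replaces A's per-character (max_length, current_length) state machine with a two-pass pipeline: normalize tab/newline to space, split on spaces into a materialized word list, then take max of the word lengths with default 0.
import Mathlib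
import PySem

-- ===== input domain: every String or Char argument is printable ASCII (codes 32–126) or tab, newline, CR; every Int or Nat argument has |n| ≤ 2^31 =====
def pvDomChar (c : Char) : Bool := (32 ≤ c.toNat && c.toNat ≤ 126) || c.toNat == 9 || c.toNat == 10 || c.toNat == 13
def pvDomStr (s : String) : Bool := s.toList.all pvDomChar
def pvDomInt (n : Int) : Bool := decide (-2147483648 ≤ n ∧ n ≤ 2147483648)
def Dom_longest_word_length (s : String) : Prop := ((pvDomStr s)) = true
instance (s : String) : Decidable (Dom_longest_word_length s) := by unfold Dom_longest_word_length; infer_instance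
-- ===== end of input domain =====

-- B replaces A's one-pass (max, current) state machine by normalize-separators / split / max-of-lengths (idiomatic two-pass pipeline).

-- ===== PORT A =====
-- helper: A's separator test "char == ' ' or char == '\t' or char == '\n'"
def pvIsSepA (c : Char) : Bool := c == ' ' || c == '\t' || c == '\n'

def longest_word_length (s : String) : Int :=
  if s = "" then 0
  else
    let st := s.toList.foldl
      (fun (st : Int × Int) c =>
        if pvIsSepA c then
          (if st.2 > st.1 then (st.2, (0 : Int)) else (st.1, 0))
        else (st.1, st.2 + 1))
      (0, 0)
    if st.2 > st.1 then st.2 else st.1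

-- ===== PORT B =====
-- Source B's s.replace('\t', ' ') with one-char old/new is exactly this per-character map (exact)
def pvTabToSpace (c : Char) : Char := if c = '\t' then ' ' else c
def pvNlToSpace (c : Char) : Char := if c = '\n' then ' ' else c

-- Source B: words = s.replace('\t',' ').replace('\n',' ').split(' '); max of lengths with default 0.
-- Python's str.split(' ') (single-char separator, empties kept) is exactly List.splitOn ' ';
-- max(gen, default=0) is PySem.List.maxD.
def longest_word_length_alt (s : String) : Int :=
  let words := List.splitOn ' ' ((s.toList.map pvTabToSpace).map pvNlToSpace)
  PySem.List.maxD (words.map (fun w => (w.length : Int))) (fun x => x) 0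

-- ===== PRECONDITION & SPEC =====
def Spec_longest_word_length (s : String) (out : Int) : Prop := out = longest_word_length_alt s
instance (s : String) (out : Int) : Decidable (Spec_longest_word_length s out) := by unfold Spec_longest_word_length; infer_instance

-- ===== CLAIM (what is proved, stated in full; the proofs are below) =====
def Claim_equal_longest_word_length : Prop := ∀ (s : String), Dom_longest_word_length s → Spec_longest_word_length s (longest_word_length s)

-- ===== LEMMAS AND PROOFS =====

-- normalizing '\t' and '\n' to ' ' and splitting on ' ' = splitting on A's separator test
lemma pv_split_map (cs : List Char) :
    List.splitOnP (fun c => c == ' ') ((cs.map pvTabToSpace).map pvNlToSpace)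
      = List.splitOnP pvIsSepA cs := by
  induction cs with
  | nil => simp
  | cons c cs ih =>
    rw [List.map_map] at ih
    by_cases hsep : pvIsSepA c = true
    · have hc : pvNlToSpace (pvTabToSpace c) = ' ' := by
        simp only [pvIsSepA, Bool.or_eq_true, beq_iff_eq] at hsep
        rcases hsep with (h | h) | h <;> subst h <;> decide
      simp [List.map_cons, List.splitOnP_cons, hc, hsep, ih]
    · simp only [pvIsSepA, Bool.or_eq_true, beq_iff_eq, not_or] at hsep
      obtain ⟨⟨h1, h2⟩, h3⟩ := hsep
      have hc : pvNlToSpace (pvTabToSpace c) = c := by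
        simp [pvTabToSpace, pvNlToSpace, h2, h3]
      simp [List.map_cons, List.splitOnP_cons, hc, h1, h2, h3, pvIsSepA, ih]

-- A's fold from state (m, cur), then the final "if cur > m" step, computes the running max
-- of m, cur + (first piece length), and the remaining piece lengths of splitOnP.
lemma pv_loop_eq (cs : List Char) : ∀ (m cur : Int) (p : List Char) (ps : List (List Char)),
    List.splitOnP pvIsSepA cs = p :: ps →
    (let st := cs.foldl
        (fun (st : Int × Int) c =>
          if pvIsSepA c then
            (if st.2 > st.1 then (st.2, (0 : Int)) else (st.1, 0))
          else (st.1, st.2 + 1))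
        (m, cur)
     if st.2 > st.1 then st.2 else st.1)
      = ps.foldl (fun acc q => max acc (q.length : Int)) (max m (cur + p.length)) := by
  induction cs with
  | nil =>
    intro m cur p ps h
    simp [List.splitOnP_nil] at h
    obtain ⟨hp, hps⟩ := h
    subst hp; subst hps
    simp only [List.foldl_nil, List.length_nil]
    split <;> omega
  | cons c cs ih =>
    intro m cur p ps h
    rw [List.splitOnP_cons] at h
    obtain ⟨q, qs, hq⟩ : ∃ q qs, List.splitOnP pvIsSepA cs = q :: qs := by
      rcases hsplit : List.splitOnP pvIsSepA cs with _ | ⟨q, qs⟩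
      · exact absurd hsplit (List.splitOnP_ne_nil _ _)
      · exact ⟨q, qs, rfl⟩
    by_cases hsep : pvIsSepA c = true
    · rw [if_pos hsep] at h
      obtain ⟨hp, hps⟩ := List.cons.injEq _ _ _ _ ▸ h
      subst hp; subst hps
      rw [hq]
      have hstep :
          (c :: cs).foldl
            (fun (st : Int × Int) c =>
              if pvIsSepA c then
                (if st.2 > st.1 then (st.2, (0 : Int)) else (st.1, 0))
              else (st.1, st.2 + 1))
            (m, cur)
          = cs.foldl
            (fun (st : Int × Int) c =>
              if pvIsSepA c then
                (if st.2 > st.1 then (st.2, (0 : Int)) else (st.1, 0))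
              else (st.1, st.2 + 1))
            (max m cur, 0) := by
        rw [List.foldl_cons]
        congr 1
        simp only [hsep, if_true]
        split <;> simp <;> omega
      simp only [hstep, ih (max m cur) 0 q qs hq]
      simp only [List.foldl_cons, List.length_nil, Nat.cast_zero, add_zero, zero_add]
    · rw [if_neg hsep] at h
      rw [hq] at h
      simp only [List.modifyHead] at h
      obtain ⟨hp, hps⟩ := List.cons.injEq _ _ _ _ ▸ h
      subst hp; subst hps
      have := ih m (cur + 1) q qs hq
      simp only [List.foldl_cons, hsep, if_false, Bool.false_eq_true] at this ⊢
      rw [this, List.length_cons]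
      have hlen : max m (cur + 1 + (q.length : Int)) = max m (cur + ((q.length + 1 : Nat) : Int)) := by
        push_cast; omega
      rw [hlen]

-- ===== VERDICT (by name: the statement is the Claim_ definition above) =====
theorem longest_word_length_spec : Claim_equal_longest_word_length := by
  intro s _
  unfold Spec_longest_word_length longest_word_length longest_word_length_alt
  have hsplit : List.splitOn ' ' ((s.toList.map pvTabToSpace).map pvNlToSpace)
      = List.splitOnP pvIsSepA s.toList := by
    rw [List.splitOn]; exact pv_split_map s.toList
  obtain ⟨p, ps, hq⟩ : ∃ p ps, List.splitOnP pvIsSepA s.toList = p :: ps := by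
    rcases h : List.splitOnP pvIsSepA s.toList with _ | ⟨p, ps⟩
    · exact absurd h (List.splitOnP_ne_nil _ _)
    · exact ⟨p, ps, rfl⟩
  by_cases hs : s = ""
  · subst hs
    rw [if_pos rfl]
    decide
  · rw [if_neg hs]
    have hA := pv_loop_eq s.toList 0 0 p ps hq
    simp only [] at hA
    rw [hA, hsplit, hq]
    simp only [List.map_cons, PySem.List.maxD, PySem.List.max?_id_cons, Option.getD_some]
    rw [List.foldl_map]
    congr 1
    omega
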